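-- pv_equiv track=rewrite | github.com/AugustineChang/LearningDoc | LearnPython/load_glb.py | searchBaseColorChannel
-- ===== SOURCE A (Python) =====
-- def searchBaseColorChannel(matChannelsNode):
--     searchKeys = ["AlbedoPBR", "DiffusePBR", "DiffuseColor"]
--
--     validKeys = []
--     for index in range(len(searchKeys)):
--         key = searchKeys[index]
--         if key not in matChannelsNode:
--             continue
--
--         curChannel = matChannelsNode[key]
--         if not curChannel["enable"]:
--             continue
--
--         validKeys.append(key)
--
--     for index in range(len(validKeys)):
--         key = validKeys[index]
--         curChannel = matChannelsNode[key]
--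
--         if "texture" in curChannel:
--             return key;
--
--     return validKeys[0]
-- ===== SOURCE B (Python) =====
-- def searchBaseColorChannel(matChannelsNode):
--     fallback = None
--     for key in ("AlbedoPBR", "DiffusePBR", "DiffuseColor"):
--         channel = matChannelsNode.get(key)
--         if channel is None or not channel["enable"]:
--             continue
--         if "texture" in channel:
--             return key
--         if fallback is None:
--             fallback = key
--     return fallback
-- ===== Notes on version B (the rewrite author's own statement) =====
-- stated objective: simpler
-- what changed: Single pass over the three search keys tracking only the first enabled key as a fallback and returning immediately on the first textured enabled key, instead of building a validKeys list and re-scanning it in a second loop.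
import Mathlib
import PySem

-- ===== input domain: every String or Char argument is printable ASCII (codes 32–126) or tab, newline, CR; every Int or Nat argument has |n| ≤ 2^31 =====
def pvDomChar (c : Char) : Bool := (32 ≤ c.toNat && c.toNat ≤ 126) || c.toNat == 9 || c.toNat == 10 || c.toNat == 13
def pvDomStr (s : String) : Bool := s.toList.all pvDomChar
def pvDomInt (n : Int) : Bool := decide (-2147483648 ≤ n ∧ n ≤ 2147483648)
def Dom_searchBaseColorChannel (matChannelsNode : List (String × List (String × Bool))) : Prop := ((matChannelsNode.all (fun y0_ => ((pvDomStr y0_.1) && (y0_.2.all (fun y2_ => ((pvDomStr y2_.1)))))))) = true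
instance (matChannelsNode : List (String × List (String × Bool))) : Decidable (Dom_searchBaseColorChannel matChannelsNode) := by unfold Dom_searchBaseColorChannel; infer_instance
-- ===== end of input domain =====

-- B replaces A's two passes (build validKeys, then rescan) by one pass keeping only the first enabled key as fallback; same result wherever A returns.

-- ===== PORT A =====
def pvSearchKeys : List String := ["AlbedoPBR", "DiffusePBR", "DiffuseColor"]

-- first loop of A: collect enabled keys present in the dict (foldl = range-indexed loop with append)
def pvAValid (m : List (String × List (String × Bool))) : List String :=
  pvSearchKeys.foldl (fun acc key =>
    match List.lookup key m with
    | none => acc                                   -- key not in matChannelsNode: continue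
    | some ch =>
      if (List.lookup "enable" ch).getD false       -- curChannel["enable"] ('enable' present on Pre_)
      then acc ++ [key] else acc) []

-- second loop of A: return first valid key whose channel has "texture", else validKeys[0]
def pvALoop2 (m : List (String × List (String × Bool))) (valid : List String) : List String → String
  | [] => ((PySem.List.pyGet? valid 0).getD "")     -- validKeys[0]; IndexError (none) excluded by Pre_
  | key :: rest =>
    if (List.lookup "texture" ((List.lookup key m).getD [])).isSome then key
    else pvALoop2 m valid rest

def searchBaseColorChannel (matChannelsNode : List (String × List (String × Bool))) : String :=
  let validKeys := pvAValid matChannelsNode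
  pvALoop2 matChannelsNode validKeys validKeys

-- ===== PORT B =====
-- B's single loop: fallback is the first enabled key seen so far (None → none)
def pvBGo (m : List (String × List (String × Bool))) : List String → Option String → String
  | [], fallback => fallback.getD ""                -- B returns fallback (None only outside Pre_)
  | key :: rest, fallback =>
    match List.lookup key m with
    | none => pvBGo m rest fallback                 -- channel is None: continue
    | some ch =>
      if (List.lookup "enable" ch).getD false then
        if (List.lookup "texture" ch).isSome then key
        else pvBGo m rest (match fallback with | none => some key | some f => some f)
      else pvBGo m rest fallback

def searchBaseColorChannel_alt (matChannelsNode : List (String × List (String × Bool))) : String :=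
  pvBGo matChannelsNode ["AlbedoPBR", "DiffusePBR", "DiffuseColor"] none

-- ===== PRECONDITION & SPEC =====
-- Pre_ excludes exactly the inputs where A raises: a KeyError when some search key present in the
-- dict has a channel without 'enable', and an IndexError when no search key is present and enabled.
def Pre_searchBaseColorChannel (matChannelsNode : List (String × List (String × Bool))) : Prop :=
  (∀ k ∈ ["AlbedoPBR", "DiffusePBR", "DiffuseColor"],
     ∀ ch, List.lookup k matChannelsNode = some ch → (List.lookup "enable" ch).isSome = true) ∧
  (∃ k ∈ ["AlbedoPBR", "DiffusePBR", "DiffuseColor"],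
     ∃ ch, List.lookup k matChannelsNode = some ch ∧ (List.lookup "enable" ch).getD false = true)
instance (matChannelsNode : List (String × List (String × Bool))) : Decidable (Pre_searchBaseColorChannel matChannelsNode) := by unfold Pre_searchBaseColorChannel; infer_instance

def pvWitness_searchBaseColorChannel : (List (String × List (String × Bool))) :=
  [("DiffusePBR", [("enable", true)])]

def Spec_searchBaseColorChannel (matChannelsNode : List (String × List (String × Bool))) (out : String) : Prop := out = searchBaseColorChannel_alt matChannelsNode
instance (matChannelsNode : List (String × List (String × Bool))) (out : String) : Decidable (Spec_searchBaseColorChannel matChannelsNode out) := by unfold Spec_searchBaseColorChannel; infer_instance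

-- ===== CLAIM (what is proved, stated in full; the proofs are below) =====
def Claim_equal_searchBaseColorChannel : Prop := ∀ (matChannelsNode : List (String × List (String × Bool))), Dom_searchBaseColorChannel matChannelsNode → Pre_searchBaseColorChannel matChannelsNode → Spec_searchBaseColorChannel matChannelsNode (searchBaseColorChannel matChannelsNode)

-- ===== LEMMAS AND PROOFS =====

-- whether a key is kept by A's first loop / B's 'enabled' test
def pvValidB (m : List (String × List (String × Bool))) (k : String) : Bool :=
  match List.lookup k m with
  | none => false
  | some ch => (List.lookup "enable" ch).getD false

def pvTexB (m : List (String × List (String × Bool))) (k : String) : Bool :=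
  (List.lookup "texture" ((List.lookup k m).getD [])).isSome

lemma pvAValid_go (m : List (String × List (String × Bool))) (ks : List String) (acc : List String) :
    ks.foldl (fun acc key =>
      match List.lookup key m with
      | none => acc
      | some ch => if (List.lookup "enable" ch).getD false then acc ++ [key] else acc) acc
    = acc ++ ks.filter (pvValidB m) := by
  induction ks generalizing acc with
  | nil => simp
  | cons k ks ih =>
    simp only [List.foldl_cons, List.filter_cons]
    cases h : List.lookup k m with
    | none =>
      have hv : pvValidB m k = false := by simp [pvValidB, h]
      simp [hv, ih]
    | some ch =>
      by_cases he : (List.lookup "enable" ch).getD false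
      · have hv : pvValidB m k = true := by simp [pvValidB, h, he]
        simp [he, hv, ih]
      · have hv : pvValidB m k = false := by simp [pvValidB, h]; simpa using he
        simp [he, hv, ih]

lemma pvAValid_eq (m : List (String × List (String × Bool))) :
    pvAValid m = pvSearchKeys.filter (pvValidB m) := by
  simpa using pvAValid_go m pvSearchKeys []

-- A's second loop computes: first textured key of l, else valid[0]
lemma pvALoop2_eq (m : List (String × List (String × Bool))) (valid : List String) (l : List String) :
    pvALoop2 m valid l =
      match l.find? (pvTexB m) with
      | some k => k
      | none => (PySem.List.pyGet? valid 0).getD "" := by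
  induction l with
  | nil => rfl
  | cons k rest ih =>
    unfold pvALoop2
    by_cases h : pvTexB m k = true
    · have h' := h; unfold pvTexB at h'
      simp [List.find?, h, h']
    · have h' := h; unfold pvTexB at h'
      simp only [Bool.not_eq_true] at h'
      simp [List.find?, h, h', ih]

-- B's loop computes: first textured valid key of ks, else (fallback orElse first valid key of ks)
lemma pvBGo_eq (m : List (String × List (String × Bool))) (ks : List String) (fb : Option String) :
    pvBGo m ks fb =
      match (ks.filter (pvValidB m)).find? (pvTexB m) with
      | some k => k
      | none =>
          (match fb with
           | some f => some f
           | none => (ks.filter (pvValidB m)).head?).getD "" := by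
  induction ks generalizing fb with
  | nil => cases fb <;> rfl
  | cons k rest ih =>
    unfold pvBGo
    cases h : List.lookup k m with
    | none =>
      have hv : pvValidB m k = false := by unfold pvValidB; simp [h]
      simp [hv, ih]
    | some ch =>
      by_cases he : (List.lookup "enable" ch).getD false
      · have hv : pvValidB m k = true := by unfold pvValidB; simp [h, he]
        cases ht : List.lookup "texture" ch with
        | some b =>
          have ht' : pvTexB m k = true := by simp [pvTexB, h, ht]
          simp [hv, he, ht, ht']
        | none =>
          have ht' : pvTexB m k = false := by simp [pvTexB, h, ht]
          cases fb with
          | none => simp [hv, he, ht, ht', ih]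
          | some f => simp [hv, he, ht, ht', ih]
      · have hv : pvValidB m k = false := by unfold pvValidB; simp [h, he]
        simp [hv, he, ih]

-- ===== VERDICT (by name: the statement is the Claim_ definition above) =====
theorem searchBaseColorChannel_spec : Claim_equal_searchBaseColorChannel := by
  intro m _ hpre
  unfold Spec_searchBaseColorChannel searchBaseColorChannel searchBaseColorChannel_alt
  rw [pvAValid_eq, pvALoop2_eq, pvBGo_eq]
  have hsk : (["AlbedoPBR", "DiffusePBR", "DiffuseColor"] : List String) = pvSearchKeys := rfl
  rw [hsk]
  set V := pvSearchKeys.filter (pvValidB m) with hV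
  cases hf : V.find? (pvTexB m) with
  | some k => rfl
  | none =>
    -- V is nonempty by Pre_'s second conjunct
    obtain ⟨_, ⟨k, hk, ch, hch, hen⟩⟩ := hpre
    have hvk : pvValidB m k = true := by unfold pvValidB; simp [hch, hen]
    have hmem : k ∈ V := by
      rw [hV]; exact List.mem_filter.mpr ⟨hk, hvk⟩
    obtain ⟨v, vs, hVe⟩ := List.exists_cons_of_ne_nil (List.ne_nil_of_mem hmem)
    rw [hVe]
    simp
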